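-- pv_equiv track=rewrite | github.com/aviswerdlow/k4 | experiments/p74/scripts/p74_nulls_ranking.py | tokenize_v2
-- ===== SOURCE A (Python) =====
-- def tokenize_v2(text, canonical_cuts):
--     """Tokenization v2 using canonical cuts for word boundaries"""
--     # Simplified tokenization based on cuts (list of positions)
--     if not canonical_cuts:
--         # Fallback to simple word splitting
--         return [word for word in text.split() if word.isalpha()]
--
--     # Use cuts to create token boundaries
--     tokens = []
--     current_token = ""
--
--     for i, char in enumerate(text):
--         if i in canonical_cuts and current_token:
--             # At a cut boundary - end current token
--             if current_token.strip() and current_token.strip().isalpha():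
--                 tokens.append(current_token.strip().upper())
--             current_token = ""
--
--         if char.isalpha():
--             current_token += char
--         elif current_token:
--             # Non-alpha character - end token
--             if current_token.strip() and current_token.strip().isalpha():
--                 tokens.append(current_token.strip().upper())
--             current_token = ""
--
--     # Add final token
--     if current_token.strip() and current_token.strip().isalpha():
--         tokens.append(current_token.strip().upper())
--
--     return tokens
-- ===== SOURCE B (Python) =====
-- def tokenize_v2(text, canonical_cuts):
--     """Tokenization v2 using canonical cuts for word boundaries"""
--     if not canonical_cuts:
--         # Fallback to simple word splitting
--         return [word for word in text.split() if word.isalpha()]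
--
--     # Normalize-then-split: break the text at cut positions and at every
--     # non-alpha character, then the tokens are exactly the words of the result.
--     cuts = set(canonical_cuts)
--     chars = []
--     for i, ch in enumerate(text):
--         if i in cuts:
--             chars.append(' ')
--         chars.append(ch if ch.isalpha() else ' ')
--     return [w.upper() for w in ''.join(chars).split()]
-- ===== Notes on version B (the rewrite author's own statement) =====
-- stated objective: faster
-- what changed: Replaces A's flush-on-boundary accumulator state machine with a normalize-then-split pass: insert a space at every cut position and for every non-alpha character, then split into words and uppercase them; cut membership is tested against a set built once instead of scanning the cuts list per character.
import Mathlib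
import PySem

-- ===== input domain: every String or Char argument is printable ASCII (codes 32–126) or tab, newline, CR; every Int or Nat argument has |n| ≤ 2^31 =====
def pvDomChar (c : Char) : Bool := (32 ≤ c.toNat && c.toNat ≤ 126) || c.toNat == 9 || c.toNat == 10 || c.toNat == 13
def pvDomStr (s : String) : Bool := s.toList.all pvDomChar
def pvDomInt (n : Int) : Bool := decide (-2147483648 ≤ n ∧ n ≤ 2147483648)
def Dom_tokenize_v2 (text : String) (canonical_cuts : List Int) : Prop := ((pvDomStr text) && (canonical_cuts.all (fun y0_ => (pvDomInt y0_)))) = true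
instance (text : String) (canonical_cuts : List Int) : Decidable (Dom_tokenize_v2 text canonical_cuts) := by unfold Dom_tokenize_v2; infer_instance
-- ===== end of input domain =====

-- B replaces A's flush-on-boundary accumulator state machine by a normalize-then-split pass
-- (break at cuts and non-alpha characters, then split into words); objective: faster (set
-- membership for cuts instead of a list scan per character).

-- ===== PORT A =====
-- the three identical 'if current_token.strip() and current_token.strip().isalpha(): tokens.append(...)' flush blocks
def pvFlushA (toks : List String) (cur : List Char) : List String :=
  if PySem.Chars.strip cur ≠ [] ∧ PySem.Chars.strIsalpha (PySem.Chars.strip cur) = true then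
    toks ++ [String.ofList (PySem.Chars.upper (PySem.Chars.strip cur))]
  else toks

-- second if-block of A's loop body ('if char.isalpha(): … elif current_token: …')
def pvCharA (s : List String × List Char) (ch : Char) : List String × List Char :=
  if PySem.Chars.isalpha ch = true then (s.1, s.2 ++ [ch])
  else if s.2 ≠ [] then (pvFlushA s.1 s.2, [])
  else s

-- one iteration of A's 'for i, char in enumerate(text)' loop
def pvStepA (canonical_cuts : List Int) (s : List String × List Char) (p : Int × Char) : List String × List Char :=
  pvCharA (if p.1 ∈ canonical_cuts ∧ s.2 ≠ [] then (pvFlushA s.1 s.2, ([] : List Char)) else s) p.2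

def tokenize_v2 (text : String) (canonical_cuts : List Int) : List String :=
  if canonical_cuts = [] then
    (PySem.Str.split₀ text).filter (fun w => PySem.Str.strIsalpha w)
  else
    let r := (PySem.List.enumerate text.toList).foldl (pvStepA canonical_cuts) ([], [])
    pvFlushA r.1 r.2

-- ===== PORT B =====
-- one iteration of B's normalizing loop
def pvStepB (cuts : PySem.Set Int) (acc : List Char) (p : Int × Char) : List Char :=
  (if PySem.Set.contains cuts p.1 then acc ++ [' '] else acc) ++
  [if PySem.Chars.isalpha p.2 = true then p.2 else ' ']

def tokenize_v2_alt (text : String) (canonical_cuts : List Int) : List String :=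
  if canonical_cuts = [] then
    (PySem.Str.split₀ text).filter (fun w => PySem.Str.strIsalpha w)
  else
    let chars := (PySem.List.enumerate text.toList).foldl (pvStepB (PySem.Set.ofList canonical_cuts)) []
    (PySem.Chars.split₀ chars).map (fun w => String.ofList (PySem.Chars.upper w))

-- ===== PRECONDITION & SPEC =====
def Spec_tokenize_v2 (text : String) (canonical_cuts : List Int) (out : List String) : Prop := out = tokenize_v2_alt text canonical_cuts
instance (text : String) (canonical_cuts : List Int) (out : List String) : Decidable (Spec_tokenize_v2 text canonical_cuts out) := by unfold Spec_tokenize_v2; infer_instance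

-- ===== CLAIM (what is proved, stated in full; the proofs are below) =====
def Claim_equal_tokenize_v2 : Prop := ∀ (text : String) (canonical_cuts : List Int), Dom_tokenize_v2 text canonical_cuts → Spec_tokenize_v2 text canonical_cuts (tokenize_v2 text canonical_cuts)

-- ===== LEMMAS AND PROOFS =====

-- normalized contribution of one (index, char) pair, membership stated on the raw cut list
def pvNorm (cuts : List Int) (p : Int × Char) : List Char :=
  (if p.1 ∈ cuts then [' '] else []) ++ [if PySem.Chars.isalpha p.2 = true then p.2 else ' ']

lemma pv_alpha_not_space (c : Char) (h : PySem.Chars.isalpha c = true) :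
    PySem.Chars.isspace c = false := by
  simp only [PySem.Chars.isalpha, PySem.Chars.isupper, PySem.Chars.islower, Bool.or_eq_true,
    Bool.and_eq_true, decide_eq_true_eq, Char.le_def] at h
  simp only [PySem.Chars.isspace, Bool.or_eq_false_iff, Bool.and_eq_false_iff,
    decide_eq_false_iff_not, Char.toNat]
  rcases h with ⟨h1, h2⟩ | ⟨h1, h2⟩ <;> simp_all [UInt32.le_iff_toNat_le] <;> omega

lemma pv_dropWhile_no (l : List Char) (h : ∀ c ∈ l, PySem.Chars.isspace c = false) :
    l.dropWhile PySem.Chars.isspace = l := by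
  cases l with
  | nil => rfl
  | cons a t => simp [h a (by simp)]

lemma pv_strip_allalpha (cur : List Char) (h : ∀ c ∈ cur, PySem.Chars.isalpha c = true) :
    PySem.Chars.strip cur = cur := by
  have h' : ∀ c ∈ cur, PySem.Chars.isspace c = false :=
    fun c hc => pv_alpha_not_space c (h c hc)
  simp only [PySem.Chars.strip, PySem.Chars.lstrip, PySem.Chars.rstrip]
  rw [pv_dropWhile_no cur h', pv_dropWhile_no cur.reverse (by simpa using fun c hc => h' c hc),
    List.reverse_reverse]

lemma pv_flushA_nil (toks : List String) : pvFlushA toks [] = toks := by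
  simp [pvFlushA, PySem.Chars.strip, PySem.Chars.lstrip, PySem.Chars.rstrip]

lemma pv_flushA_alpha (toks : List String) (cur : List Char) (hne : cur ≠ [])
    (h : ∀ c ∈ cur, PySem.Chars.isalpha c = true) :
    pvFlushA toks cur = toks ++ [String.ofList (PySem.Chars.upper cur)] := by
  unfold pvFlushA
  rw [pv_strip_allalpha cur h]
  rw [if_pos ⟨hne, by simp [PySem.Chars.strIsalpha, List.all_eq_true, hne]; exact h⟩]

lemma pv_go_acc (s : List Char) : ∀ (cur : List Char) (acc : List (List Char)),
    PySem.Chars.split₀.go s cur acc = acc.reverse ++ PySem.Chars.split₀.go s cur [] := by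
  induction s with
  | nil =>
    intro cur acc
    simp only [PySem.Chars.split₀.go]
    split <;> simp
  | cons c rest ih =>
    intro cur acc
    simp only [PySem.Chars.split₀.go]
    split
    · split
      · exact ih [] acc
      · rw [ih [] (cur.reverse :: acc), ih [] [cur.reverse]]
        simp
    · exact ih (c :: cur) acc

lemma pv_go_word (w : List Char) (hw : ∀ c ∈ w, PySem.Chars.isspace c = false) :
    ∀ (cs cur : List Char) (acc : List (List Char)),
    PySem.Chars.split₀.go (w ++ cs) cur acc = PySem.Chars.split₀.go cs (w.reverse ++ cur) acc := by
  induction w with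
  | nil => intro cs cur acc; simp
  | cons a t ih =>
    intro cs cur acc
    have ha := hw a (by simp)
    simp only [List.cons_append, PySem.Chars.split₀.go, ha]
    rw [ih (fun c hc => hw c (by simp [hc])) cs (a :: cur) acc]
    simp

lemma pv_split₀_space_cons (c : Char) (cs : List Char) (hs : PySem.Chars.isspace c = true) :
    PySem.Chars.split₀ (c :: cs) = PySem.Chars.split₀ cs := by
  simp [PySem.Chars.split₀, PySem.Chars.split₀.go, hs]

lemma pv_split₀_word_space (w cs : List Char) (hne : w ≠ [])
    (hw : ∀ c ∈ w, PySem.Chars.isspace c = false) :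
    PySem.Chars.split₀ (w ++ ' ' :: cs) = w :: PySem.Chars.split₀ cs := by
  unfold PySem.Chars.split₀
  rw [pv_go_word w hw (' ' :: cs) [] []]
  simp only [List.append_nil]
  have hsp : PySem.Chars.isspace ' ' = true := by decide
  have hrev : w.reverse.isEmpty = false := by simp [hne]
  simp only [PySem.Chars.split₀.go, hsp, hrev, if_true, if_false, Bool.false_eq_true]
  rw [pv_go_acc]
  simp

lemma pv_split₀_word_nil (w : List Char) (hne : w ≠ [])
    (hw : ∀ c ∈ w, PySem.Chars.isspace c = false) :
    PySem.Chars.split₀ w = [w] := by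
  unfold PySem.Chars.split₀
  have := pv_go_word w hw [] [] []
  rw [List.append_nil] at this
  rw [this]
  have hrev : w.reverse.isEmpty = false := by simp [hne]
  simp [PySem.Chars.split₀.go, hrev]

lemma pv_chars_eq (cuts : List Int) (l : List (Int × Char)) (acc : List Char) :
    l.foldl (pvStepB (PySem.Set.ofList cuts)) acc = acc ++ l.flatMap (pvNorm cuts) := by
  rw [PySem.List.foldl_congr_mem l (pvStepB (PySem.Set.ofList cuts))
    (fun acc x => acc ++ pvNorm cuts x) acc ?_]
  · exact PySem.List.foldl_append_eq_flatMap (pvNorm cuts) l acc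
  · intro a p _
    have hm : PySem.Set.contains (PySem.Set.ofList cuts) p.1 = decide (p.1 ∈ cuts) := by
      by_cases hp : p.1 ∈ cuts <;>
        simp [PySem.Set.contains, hp, (PySem.Set.mem_ofList cuts p.1)]
    simp only [pvStepB, pvNorm, hm]
    by_cases hp : p.1 ∈ cuts <;> simp [hp]

-- the char-handling half of one A step, assuming the induction hypothesis for the rest
lemma pv_charstep (cuts : List Int) (rest : List (Int × Char))
    (ih : ∀ (toks : List String) (cur : List Char), (∀ c ∈ cur, PySem.Chars.isalpha c = true) →
      pvFlushA (rest.foldl (pvStepA cuts) (toks, cur)).1 (rest.foldl (pvStepA cuts) (toks, cur)).2 =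
      toks ++ (PySem.Chars.split₀ (cur ++ rest.flatMap (pvNorm cuts))).map
        (fun w => String.ofList (PySem.Chars.upper w)))
    (toks : List String) (cur : List Char) (ch : Char)
    (h : ∀ c ∈ cur, PySem.Chars.isalpha c = true) :
    pvFlushA (rest.foldl (pvStepA cuts) (pvCharA (toks, cur) ch)).1
        (rest.foldl (pvStepA cuts) (pvCharA (toks, cur) ch)).2 =
    toks ++ (PySem.Chars.split₀ (cur ++ (if PySem.Chars.isalpha ch = true then ch else ' ') ::
        rest.flatMap (pvNorm cuts))).map (fun w => String.ofList (PySem.Chars.upper w)) := by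
  have hsp : ∀ c ∈ cur, PySem.Chars.isspace c = false :=
    fun c hc => pv_alpha_not_space c (h c hc)
  by_cases ha : PySem.Chars.isalpha ch = true
  · have hstep : pvCharA (toks, cur) ch = (toks, cur ++ [ch]) := by simp [pvCharA, ha]
    rw [hstep, ih toks (cur ++ [ch]) (by
      intro c hc
      simp only [List.mem_append, List.mem_singleton] at hc
      rcases hc with hc | rfl
      exacts [h c hc, ha])]
    simp [ha, List.append_assoc]
  · simp only [ha, if_false, Bool.false_eq_true]
    by_cases hc : cur = []
    · subst hc
      have hstep' : pvCharA (toks, ([] : List Char)) ch = (toks, []) := by simp [pvCharA, ha]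
      rw [hstep', ih toks [] (by simp)]
      have hna : (([] : List Char) ++ ' ' :: rest.flatMap (pvNorm cuts)) =
          ' ' :: rest.flatMap (pvNorm cuts) := rfl
      rw [hna, pv_split₀_space_cons ' ' _ (by decide)]
      rfl
    · have hstep : pvCharA (toks, cur) ch = (toks ++ [String.ofList (PySem.Chars.upper cur)], []) := by
        simp only [pvCharA, ha, if_false, Bool.false_eq_true]
        rw [if_pos (by exact hc), pv_flushA_alpha toks cur hc h]
      rw [hstep, ih _ [] (by simp)]
      rw [pv_split₀_word_space cur _ hc hsp]
      simp [List.append_assoc]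

lemma pv_main (cuts : List Int) (l : List (Int × Char)) :
    ∀ (toks : List String) (cur : List Char), (∀ c ∈ cur, PySem.Chars.isalpha c = true) →
    pvFlushA (l.foldl (pvStepA cuts) (toks, cur)).1 (l.foldl (pvStepA cuts) (toks, cur)).2 =
    toks ++ (PySem.Chars.split₀ (cur ++ l.flatMap (pvNorm cuts))).map
      (fun w => String.ofList (PySem.Chars.upper w)) := by
  induction l with
  | nil =>
    intro toks cur h
    simp only [List.foldl_nil, List.flatMap_nil, List.append_nil]
    by_cases hc : cur = []
    · subst hc
      simp [pv_flushA_nil, PySem.Chars.split₀, PySem.Chars.split₀.go]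
    · rw [pv_flushA_alpha toks cur hc h,
        pv_split₀_word_nil cur hc (fun c hcc => pv_alpha_not_space c (h c hcc))]
      simp
  | cons p rest ih =>
    intro toks cur h
    obtain ⟨i, ch⟩ := p
    simp only [List.foldl_cons, List.flatMap_cons]
    by_cases hcut : i ∈ cuts
    · by_cases hc : cur = []
      · subst hc
        have hstep : pvStepA cuts (toks, ([] : List Char)) (i, ch) = pvCharA (toks, []) ch := by
          simp [pvStepA]
        rw [hstep]
        have := pv_charstep cuts rest ih toks [] ch (by simp)
        rw [this]
        simp only [pvNorm, hcut, if_pos, List.nil_append, List.cons_append]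
        rw [pv_split₀_space_cons ' ' _ (by decide)]
      · have hstep : pvStepA cuts (toks, cur) (i, ch) =
            pvCharA (toks ++ [String.ofList (PySem.Chars.upper cur)], []) ch := by
          simp only [pvStepA]
          rw [if_pos ⟨hcut, hc⟩, pv_flushA_alpha toks cur hc h]
        rw [hstep]
        rw [pv_charstep cuts rest ih _ [] ch (by simp)]
        simp only [pvNorm, hcut, if_pos, List.cons_append, List.nil_append]
        rw [pv_split₀_word_space cur _ hc (fun c hcc => pv_alpha_not_space c (h c hcc))]
        simp [List.append_assoc]
    · have hstep : pvStepA cuts (toks, cur) (i, ch) = pvCharA (toks, cur) ch := by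
        simp [pvStepA, hcut]
      rw [hstep, pv_charstep cuts rest ih toks cur ch h]
      simp [pvNorm, hcut]

-- ===== VERDICT (by name: the statement is the Claim_ definition above) =====
theorem tokenize_v2_spec : Claim_equal_tokenize_v2 := by
  intro text canonical_cuts _hdom
  show tokenize_v2 text canonical_cuts = tokenize_v2_alt text canonical_cuts
  by_cases hnil : canonical_cuts = []
  · simp [tokenize_v2, tokenize_v2_alt, hnil]
  · simp only [tokenize_v2, tokenize_v2_alt, if_neg hnil]
    rw [pv_chars_eq canonical_cuts (PySem.List.enumerate text.toList) []]
    rw [pv_main canonical_cuts (PySem.List.enumerate text.toList) [] [] (by simp)]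
    simp
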